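-- pv_equiv track=rewrite | github.com/doocs/leetcode | solution/3500-3599/3528.Unit Conversion I/Solution.py | baseUnitConversions
-- ===== SOURCE A (Python) =====
-- from typing import List
--
-- def baseUnitConversions(conversions: List[List[int]]) -> List[int]:
--     def dfs(s: int, mul: int) -> None:
--         ans[s] = mul
--         for t, w in g[s]:
--             dfs(t, mul * w % mod)
--
--     mod = 10**9 + 7
--     n = len(conversions) + 1
--     g = [[] for _ in range(n)]
--     for s, t, w in conversions:
--         g[s].append((t, w))
--     ans = [0] * n
--     dfs(0, 1)
--     return ans
-- ===== SOURCE B (Python) =====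
-- from typing import List
--
-- def baseUnitConversions(conversions: List[List[int]]) -> List[int]:
--     mod = 10**9 + 7
--     n = len(conversions) + 1
--     g = [[] for _ in range(n)]
--     for s, t, w in conversions:
--         g[s].append((t, w))
--     ans = [0] * n
--     stack = [(0, 1)]
--     while stack:
--         s, mul = stack.pop()
--         ans[s] = mul
--         stack.extend((t, mul * w % mod) for t, w in reversed(g[s]))
--     return ans
-- ===== Notes on version B (the rewrite author's own statement) =====
-- stated objective: alternative
-- what changed: The recursive dfs is replaced by an explicit-stack while loop that pops a (node, factor) frame, writes it, and pushes the node's out-edges in reverse, reproducing A's exact preorder write sequence without recursion.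
import Mathlib
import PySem

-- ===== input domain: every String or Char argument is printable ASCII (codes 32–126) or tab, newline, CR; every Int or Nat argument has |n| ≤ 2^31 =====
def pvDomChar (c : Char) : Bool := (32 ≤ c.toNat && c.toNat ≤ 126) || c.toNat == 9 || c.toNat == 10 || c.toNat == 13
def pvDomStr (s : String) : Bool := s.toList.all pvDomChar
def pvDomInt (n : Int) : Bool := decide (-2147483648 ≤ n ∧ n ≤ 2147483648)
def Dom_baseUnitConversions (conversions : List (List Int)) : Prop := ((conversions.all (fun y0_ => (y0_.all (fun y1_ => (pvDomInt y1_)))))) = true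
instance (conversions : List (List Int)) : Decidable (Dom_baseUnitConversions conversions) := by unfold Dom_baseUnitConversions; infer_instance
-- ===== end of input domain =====

-- B replaces A's recursive dfs by an explicit-stack loop that pushes each node's
-- out-edges in reverse, so it performs exactly A's preorder write sequence without
-- recursion (objective: alternative decomposition; same cost).

-- ===== PORT A =====

-- mod = 10**9 + 7
def pvMod : Int := 1000000007

-- g = [[] for _ in range(n)]; for s, t, w in conversions: g[s].append((t, w))
-- (g[s] with Python's negative-index wraparound = pyGetD/pySetD; rows outside
-- Pre_ make Python raise, the total forms are mere guards there)
def pvBuildA (conversions : List (List Int)) (n : Nat) : List (List (Int × Int)) :=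
  conversions.foldl
    (fun g r =>
      let s := r.getD 0 0
      let t := r.getD 1 0
      let w := r.getD 2 0
      PySem.List.pySetD g s ((PySem.List.pyGetD g s []) ++ [(t, w)]))
    (List.replicate n ([] : List (Int × Int)))

-- def dfs(s, mul): ans[s] = mul; for t, w in g[s]: dfs(t, mul * w % mod)
-- fuel = recursion-depth guard; under Pre_ the reachable part is acyclic, so a
-- chain visits pairwise distinct wrapped nodes and depth n (passed below) suffices.
def pvDfsA (g : List (List (Int × Int))) : Nat → Int → Int → List Int → List Int
  | 0, _, _, ans => ans
  | fuel + 1, s, mul, ans =>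
      let ans1 := PySem.List.pySetD ans s mul
      (PySem.List.pyGetD g s []).foldl
        (fun a tw => pvDfsA g fuel tw.1 (PySem.Int.mod (mul * tw.2) pvMod) a) ans1

def baseUnitConversions (conversions : List (List Int)) : List Int :=
  let n := conversions.length + 1
  let g := pvBuildA conversions n
  let ans := List.replicate n (0 : Int)
  pvDfsA g n 0 1 ans

-- ===== PORT B =====

-- identical graph build (Source B keeps A's construction lines verbatim)
def pvBuildB (conversions : List (List Int)) (n : Nat) : List (List (Int × Int)) :=
  conversions.foldl
    (fun g r =>
      let s := r.getD 0 0
      let t := r.getD 1 0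
      let w := r.getD 2 0
      PySem.List.pySetD g s ((PySem.List.pyGetD g s []) ++ [(t, w)]))
    (List.replicate n ([] : List (Int × Int)))

-- max out-degree of g, used only by the termination measure of the loop
def pvDeg (g : List (List (Int × Int))) : Nat :=
  g.foldl (fun m l => max m l.length) 0

-- potential of a stack: Σ (deg+1)^fuel over its frames
def pvPot (g : List (List (Int × Int))) (st : List (Nat × Int × Int)) : Nat :=
  (st.map (fun fr => (pvDeg g + 1) ^ fr.1)).sum

theorem pvFoldMax_init_le (gs : List (List (Int × Int))) :
    ∀ m : Nat, m ≤ gs.foldl (fun m l => max m l.length) m := by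
  induction gs with
  | nil => intro m; simp
  | cons x xs ih =>
      intro m
      exact le_trans (le_max_left _ _) (ih (max m x.length))

theorem pvDeg_mem {g : List (List (Int × Int))} {l : List (Int × Int)}
    (h : l ∈ g) : l.length ≤ pvDeg g := by
  have key : ∀ (gs : List (List (Int × Int))) (m : Nat), l ∈ gs →
      l.length ≤ gs.foldl (fun m l => max m l.length) m := by
    intro gs
    induction gs with
    | nil => intro m h; cases h
    | cons x xs ih =>
      intro m h
      rcases List.mem_cons.mp h with rfl | h'
      · exact le_trans (le_max_right m l.length) (pvFoldMax_init_le xs _)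
      · exact ih _ h'
  exact key g 0 h

-- while stack: s, mul = stack.pop(); ans[s] = mul;
--              stack.extend((t, mul*w % mod) for t, w in reversed(g[s]))
-- Python pops/extends at the list's END; here the head is the top, so pushing the
-- children IN ORDER is exactly Source B's reversed extend.  Each frame carries a depth
-- fuel (a totality guard only; under Pre_ depth n never runs out).
def pvStepB (g : List (List (Int × Int))) : List (Nat × Int × Int) → List Int → List Int
  | [], ans => ans
  | (0, _, _) :: st, ans => pvStepB g st ans
  | (fuel + 1, s, mul) :: st, ans =>
      pvStepB g
        (((PySem.List.pyGetD g s []).map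
            (fun tw => (fuel, tw.1, PySem.Int.mod (mul * tw.2) pvMod))) ++ st)
        (PySem.List.pySetD ans s mul)
  termination_by st _ => pvPot g st
  decreasing_by
  · simp only [pvPot, List.map_cons, List.sum_cons, pow_zero]; omega
  · have hlen : (PySem.List.pyGetD g s []).length ≤ pvDeg g := by
      by_cases hin : PySem.Raise.InRange g.length s
      · exact pvDeg_mem (PySem.List.pyGetD_mem g [] hin)
      · have hnone : PySem.List.pyGet? g s = none :=
          (PySem.List.pyGet?_eq_none_iff g s).mpr hin
        simp [PySem.List.pyGetD_of_none g s [] hnone]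
    have h1 : ∀ (l : List (Int × Int)),
        (l.map ((fun fr : Nat × Int × Int => (pvDeg g + 1) ^ fr.1) ∘
          (fun tw => (fuel, tw.1, PySem.Int.mod (mul * tw.2) pvMod)))).sum
        = l.length * (pvDeg g + 1) ^ fuel := by
      intro l
      induction l with
      | nil => simp
      | cons a l ih => simp [ih, Nat.succ_mul, Nat.add_comm, Function.comp]
    have hX : 0 < (pvDeg g + 1) ^ fuel := Nat.pow_pos (by omega)
    have h2 : (PySem.List.pyGetD g s []).length * (pvDeg g + 1) ^ fuel
        < (pvDeg g + 1) ^ (fuel + 1) := by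
      calc (PySem.List.pyGetD g s []).length * (pvDeg g + 1) ^ fuel
          ≤ pvDeg g * (pvDeg g + 1) ^ fuel := Nat.mul_le_mul_right _ hlen
        _ < (pvDeg g + 1) * (pvDeg g + 1) ^ fuel :=
            mul_lt_mul_of_pos_right (by omega) hX
        _ = (pvDeg g + 1) ^ (fuel + 1) := by ring
    simp only [pvPot, List.map_append, List.sum_append, List.map_cons, List.sum_cons,
      List.map_map]
    rw [h1]
    simp only [Nat.succ_eq_add_one]
    omega

def baseUnitConversions_alt (conversions : List (List Int)) : List Int :=
  let n := conversions.length + 1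
  let g := pvBuildB conversions n
  let ans := List.replicate n (0 : Int)
  pvStepB g [(n, 0, 1)] ans

-- ===== PRECONDITION & SPEC =====

-- helpers describing the input graph (bounds/shape/reachability of the input's
-- edge relation; nothing here computes either program's output)
def pvN (conversions : List (List Int)) : Nat := conversions.length + 1

def pvWrap (n : Nat) (i : Int) : Nat := (PySem.Int.mod i n).toNat

def pvEdges (conversions : List (List Int)) : List (Nat × Int) :=
  conversions.map (fun r => (pvWrap (pvN conversions) (r.getD 0 0), r.getD 1 0))

def pvInRange (n : Nat) (t : Int) : Bool := -(n : Int) ≤ t && t < n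

-- one closure step: add the (wrapped) targets of in-range edges leaving R
def pvStep (conversions : List (List Int)) (R : List Nat) : List Nat :=
  R ++ (pvEdges conversions).filterMap
    (fun e => if e.1 ∈ R ∧ pvInRange (pvN conversions) e.2 = true
              then some (pvWrap (pvN conversions) e.2) else none)

def pvClosure (conversions : List (List Int)) (S : List Nat) : List Nat :=
  (pvStep conversions)^[pvN conversions] S

def pvSuccs (conversions : List (List Int)) (x : Nat) : List Nat :=
  (pvEdges conversions).filterMap
    (fun e => if e.1 = x ∧ pvInRange (pvN conversions) e.2 = true
              then some (pvWrap (pvN conversions) e.2) else none)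

-- Pre_ = exactly the inputs on which the Python A returns: every row has three
-- entries and an in-range source (else the graph build raises), every edge leaving
-- a node reachable from 0 has an in-range target (else ans[t] raises IndexError),
-- and no node reachable from 0 lies on a cycle (else the recursion never ends).
-- These are shape/reachability facts about the input's edge relation, read off
-- without running either program.
def Pre_baseUnitConversions (conversions : List (List Int)) : Prop :=
  (∀ r ∈ conversions, r.length = 3 ∧
      -((pvN conversions : Nat) : Int) ≤ r.getD 0 0 ∧ r.getD 0 0 < (pvN conversions : Nat)) ∧
  (∀ e ∈ pvEdges conversions, e.1 ∈ pvClosure conversions [0] →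
      pvInRange (pvN conversions) e.2 = true) ∧
  (∀ x ∈ pvClosure conversions [0], x ∉ pvClosure conversions (pvSuccs conversions x))

instance (conversions : List (List Int)) : Decidable (Pre_baseUnitConversions conversions) := by
  unfold Pre_baseUnitConversions; infer_instance

def pvWitness_baseUnitConversions : List (List Int) := [[0, 1, 2], [1, 2, 3], [0, 3, 5]]

def Spec_baseUnitConversions (conversions : List (List Int)) (out : List Int) : Prop := out = baseUnitConversions_alt conversions
instance (conversions : List (List Int)) (out : List Int) : Decidable (Spec_baseUnitConversions conversions out) := by unfold Spec_baseUnitConversions; infer_instance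

-- ===== CLAIM (what is proved, stated in full; the proofs are below) =====
def Claim_equal_baseUnitConversions : Prop := ∀ (conversions : List (List Int)), Dom_baseUnitConversions conversions → Pre_baseUnitConversions conversions → Spec_baseUnitConversions conversions (baseUnitConversions conversions)

-- ===== LEMMAS AND PROOFS =====

-- the stack machine run = folding A's dfs over the frames (top first)
theorem pvStepB_eq_foldl (g : List (List (Int × Int))) (st : List (Nat × Int × Int))
    (ans : List Int) :
    pvStepB g st ans = st.foldl (fun a fr => pvDfsA g fr.1 fr.2.1 fr.2.2 a) ans := by
  fun_induction pvStepB g st ans with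
  | case1 ans => rfl
  | case2 s mul st ans ih =>
      simp only [List.foldl_cons, ih]
      rfl
  | case3 fuel s mul st ans ih =>
      simp only [List.foldl_cons, ih, List.foldl_append, List.foldl_map]
      rfl

-- ===== VERDICT (by name: the statement is the Claim_ definition above) =====
theorem baseUnitConversions_spec : Claim_equal_baseUnitConversions := by
  intro conversions _ _
  unfold Spec_baseUnitConversions baseUnitConversions baseUnitConversions_alt
  have hb : pvBuildB conversions (conversions.length + 1)
      = pvBuildA conversions (conversions.length + 1) := rfl
  simp only [hb, pvStepB_eq_foldl, List.foldl_cons, List.foldl_nil]
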